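-- pv_equiv track=rewrite | github.com/Mishquad/git_scraper | scraper04_oop/repository_processor.py | _get_patch
-- ===== SOURCE A (Python) =====
-- def _get_patch(git_diff: str) -> str:
--     """
--     Extract non-test-related changes from the git diff.
--
--     Args:
--         git_diff: The full git diff string
--
--     Returns:
--         A diff string containing only non-test files
--     """
--     other_patches = []
--     current_patch = []
--     in_patch = False
--     is_test_file = False
--
--     for line in git_diff.splitlines(keepends=True):
--         if line.startswith("diff --git"):
--             # Process the previous patch if we were in one
--             if in_patch and not is_test_file:
--                 other_patches.extend(current_patch)
--
--             # Reset for new patch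
--             current_patch = [line]
--             in_patch = True
--             is_test_file = False
--
--             # Check if this is a test file
--             if "test/" in line or "tests/" in line or "_test.py" in line or "test_" in line:
--                 is_test_file = True
--         elif in_patch:
--             current_patch.append(line)
--
--     # Add the last patch if it wasn't a test file
--     if in_patch and not is_test_file:
--         other_patches.extend(current_patch)
--
--     return "".join(other_patches)
-- ===== SOURCE B (Python) =====
-- def _get_patch(git_diff: str) -> str:
--     """Two-phase: group lines into patches by header, then keep non-test groups."""
--     lines = git_diff.splitlines(keepends=True)
--     n = len(lines)
--     groups = []
--     i = 0
--     while i < n: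
--         if lines[i].startswith("diff --git"):
--             j = i + 1
--             while j < n and not lines[j].startswith("diff --git"):
--                 j += 1
--             groups.append(lines[i:j])
--             i = j
--         else:
--             i += 1  # preamble line before the first header: dropped
--     return "".join(
--         "".join(g)
--         for g in groups
--         if not any(t in g[0] for t in ("test/", "tests/", "_test.py", "test_"))
--     )
-- ===== Notes on version B (the rewrite author's own statement) =====
-- stated objective: alternative
-- what changed: Replaces A's single streaming scan with in_patch/is_test_file flag state by a two-phase algorithm: first group lines into patch sections (index scan to the next 'diff --git' header), then filter the groups by testing only each group's header line and join the kept groups.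
import Mathlib
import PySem

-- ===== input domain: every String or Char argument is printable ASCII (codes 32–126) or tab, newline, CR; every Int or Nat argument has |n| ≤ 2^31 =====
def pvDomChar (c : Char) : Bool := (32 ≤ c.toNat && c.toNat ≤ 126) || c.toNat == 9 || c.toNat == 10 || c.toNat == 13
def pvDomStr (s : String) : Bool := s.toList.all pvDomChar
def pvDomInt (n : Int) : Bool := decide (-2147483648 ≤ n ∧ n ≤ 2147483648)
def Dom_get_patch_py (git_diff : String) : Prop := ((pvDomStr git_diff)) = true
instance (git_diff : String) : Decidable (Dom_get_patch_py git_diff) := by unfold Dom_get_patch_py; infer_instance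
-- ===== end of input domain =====

-- B groups the lines into patch sections first and then filters by each section's
-- header line only — an alternative two-phase decomposition of A's streaming scan.

-- Shared primitive: str.splitlines(keepends=True), hand-ported (PySem has only the
-- keepends=False form). Exact on Dom, whose only line-break characters are '\n',
-- '\r' and the pair "\r\n" (Python's extra breaks \v \f \x1c-\x1e \x85 u2028/u2029
-- lie outside Dom).
def splitKeepGo : List Char → List Char → List (List Char)
  | [], acc => if acc = [] then [] else [acc.reverse]
  | '\r' :: '\n' :: rest, acc => (acc.reverse ++ ['\r', '\n']) :: splitKeepGo rest []
  | c :: rest, acc =>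
      if c = '\n' ∨ c = '\r' then (acc.reverse ++ [c]) :: splitKeepGo rest []
      else splitKeepGo rest (c :: acc)
  termination_by cs _ => cs.length

def splitKeep (cs : List Char) : List (List Char) := splitKeepGo cs []

-- line.startswith("diff --git")
def isHeader (l : List Char) : Bool := PySem.Chars.startswith l "diff --git".toList

-- the test-file substring check, run on a header line (same in A and B)
def isTestLine (l : List Char) : Bool :=
  PySem.Chars.isIn "test/".toList l || PySem.Chars.isIn "tests/".toList l ||
  PySem.Chars.isIn "_test.py".toList l || PySem.Chars.isIn "test_".toList l

-- ===== PORT A =====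
-- A's for-loop as structural recursion over the same state
-- (other_patches, current_patch, in_patch, is_test_file).
def loopA : List (List Char) → List (List Char) → List (List Char) → Bool → Bool →
    List (List Char) × List (List Char) × Bool × Bool
  | [], other, current, inp, ist => (other, current, inp, ist)
  | l :: rest, other, current, inp, ist =>
      if isHeader l then
        let other' := if inp && !ist then other ++ current else other
        loopA rest other' [l] true (isTestLine l)
      else if inp then
        loopA rest other (current ++ [l]) inp ist
      else
        loopA rest other current inp ist

def get_patch_py (git_diff : String) : String :=
  let (other, current, inp, ist) := loopA (splitKeep git_diff.toList) [] [] false false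
  let other := if inp && !ist then other ++ current else other
  String.mk other.flatten          -- "".join(other_patches)

-- ===== PORT B =====
-- Phase 1 of Source B: scan forward; at a header take the section up to the next header
-- (the inner `while j` scan = span over non-header lines), skip preamble lines.
def groupPatches : List (List Char) → List (List (List Char))
  | [] => []
  | l :: rest =>
      if isHeader l then
        (l :: rest.takeWhile (fun x => !isHeader x)) ::
          groupPatches (rest.dropWhile (fun x => !isHeader x))
      else
        groupPatches rest
  termination_by ls => ls.length
  decreasing_by
  · simpa using Nat.lt_succ_of_le (List.length_dropWhile_le _ _)
  · simp

def get_patch_py_alt (git_diff : String) : String :=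
  let groups := groupPatches (splitKeep git_diff.toList)
  let kept := groups.filter (fun g => !isTestLine (g.headD []))
  String.mk (kept.map List.flatten).flatten

-- ===== PRECONDITION & SPEC =====
def Spec_get_patch_py (git_diff : String) (out : String) : Prop := out = get_patch_py_alt git_diff
instance (git_diff : String) (out : String) : Decidable (Spec_get_patch_py git_diff out) := by unfold Spec_get_patch_py; infer_instance

-- ===== CLAIM (what is proved, stated in full; the proofs are below) =====
def Claim_equal_get_patch_py : Prop := ∀ (git_diff : String), Dom_get_patch_py git_diff → Spec_get_patch_py git_diff (get_patch_py git_diff)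

-- ===== LEMMAS AND PROOFS =====

-- B's kept output of a line list, as one list of lines
def procB (ls : List (List Char)) : List (List Char) :=
  ((groupPatches ls).filter (fun g => !isTestLine (g.headD []))).flatten

-- A's loop followed by its final flush, as one list of lines
def resA (ls other current : List (List Char)) (inp ist : Bool) : List (List Char) :=
  let (o, c, i, t) := loopA ls other current inp ist
  if i && !t then o ++ c else o

theorem procB_cons_header {l : List Char} (rest : List (List Char)) (h : isHeader l = true) :
    procB (l :: rest) =
      (if !isTestLine l then l :: rest.takeWhile (fun x => !isHeader x) else []) ++
        procB (rest.dropWhile (fun x => !isHeader x)) := by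
  simp only [procB, groupPatches, h, if_pos]
  by_cases ht : isTestLine l <;> simp [ht]

theorem procB_cons_nonheader {l : List Char} (rest : List (List Char)) (h : isHeader l = false) :
    procB (l :: rest) = procB rest := by
  simp [procB, groupPatches, h]

theorem procB_dropWhile (ls : List (List Char)) :
    procB (ls.dropWhile (fun x => !isHeader x)) = procB ls := by
  induction ls with
  | nil => rfl
  | cons l rest ih =>
    by_cases h : isHeader l
    · simp [List.dropWhile_cons, h]
    · rw [List.dropWhile_cons]
      simp only [h, Bool.not_false, if_pos]
      rw [ih, procB_cons_nonheader rest (by simp [h])]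

theorem resA_eq (ls : List (List Char)) : ∀ (other current : List (List Char)) (inp ist : Bool),
    resA ls other current inp ist =
      other ++ (if inp && !ist then current ++ ls.takeWhile (fun x => !isHeader x) else []) ++
        procB (ls.dropWhile (fun x => !isHeader x)) := by
  induction ls with
  | nil => intro other current inp ist
           simp only [resA, loopA, List.takeWhile_nil, List.dropWhile_nil, procB, groupPatches]
           by_cases h : inp && !ist <;> simp [h]
  | cons l rest ih =>
    intro other current inp ist
    by_cases h : isHeader l
    · have step : resA (l :: rest) other current inp ist =
          resA rest (if inp && !ist then other ++ current else other) [l] true (isTestLine l) := by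
        simp [resA, loopA, h]
      rw [step, ih]
      simp [List.dropWhile_cons, List.takeWhile_cons, h]
      rw [procB_cons_header rest h]
      by_cases ht : isTestLine l <;> by_cases hi : inp && !ist <;>
        simp [ht, hi, List.append_assoc] <;> split_ifs <;> simp_all [List.append_assoc]
    · have hb : isHeader l = false := by simpa using h
      rw [List.dropWhile_cons, List.takeWhile_cons]
      simp only [hb, Bool.not_false, if_pos]
      by_cases hi : inp
      · have step : resA (l :: rest) other current inp ist =
            resA rest other (current ++ [l]) inp ist := by
          simp [resA, loopA, hb, hi]
        rw [step, ih]
        by_cases ht : ist <;> simp [hi, ht, List.append_assoc]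
      · have step : resA (l :: rest) other current inp ist =
            resA rest other current inp ist := by
          simp [resA, loopA, hb, hi]
        rw [step, ih]
        simp [hi]

theorem flatten_map_flatten {α : Type} (gs : List (List (List α))) :
    gs.flatten.flatten = (gs.map List.flatten).flatten := by
  induction gs with
  | nil => rfl
  | cons g gs ih => simp [List.flatten_append, ih]

-- ===== VERDICT (by name: the statement is the Claim_ definition above) =====
theorem get_patch_py_spec : Claim_equal_get_patch_py := by
  intro git_diff _
  unfold Spec_get_patch_py
  have hA : get_patch_py git_diff =
      String.mk (resA (splitKeep git_diff.toList) [] [] false false).flatten := rfl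
  rw [hA, resA_eq, procB_dropWhile]
  simp [procB, flatten_map_flatten, get_patch_py_alt]
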